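-- pv_equiv track=rewrite | github.com/jas29/Data-Mining | src.py | Seperate_Genre
-- ===== SOURCE A (Python) =====
-- def Seperate_Genre(Dict,data):
--     newDict = Dict
--     Genre = data['Genre']
--     List = Genre.split(",")
--     num = 1
--     for genre in List:
--         newDict['Genre' +str(num)] = genre
--         num+= 1
--     for j in range(num,4):
--         newDict['Genre' +str(j)] = ""
--     return newDict
-- ===== SOURCE B (Python) =====
-- def Seperate_Genre(Dict, data):
--     parts = data['Genre'].split(',')[::-1]
--     i = 1
--     while parts or i <= 3:
--         Dict['Genre' + str(i)] = parts.pop() if parts else ''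
--         i += 1
--     return Dict
-- ===== Notes on version B (the rewrite author's own statement) =====
-- stated objective: alternative
-- what changed: Replaces A's two staged for-loops (a counter loop over the split list, then a range(num,4) blank-filling loop) with one while-loop under a unified condition 'parts or i <= 3' that destructively consumes the reversed split list via pop(), producing blanks when it is exhausted.
-- outside the precondition, e.g. on Seperate_Genre({}, {}): A raises KeyError, B raises KeyError
import Mathlib
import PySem

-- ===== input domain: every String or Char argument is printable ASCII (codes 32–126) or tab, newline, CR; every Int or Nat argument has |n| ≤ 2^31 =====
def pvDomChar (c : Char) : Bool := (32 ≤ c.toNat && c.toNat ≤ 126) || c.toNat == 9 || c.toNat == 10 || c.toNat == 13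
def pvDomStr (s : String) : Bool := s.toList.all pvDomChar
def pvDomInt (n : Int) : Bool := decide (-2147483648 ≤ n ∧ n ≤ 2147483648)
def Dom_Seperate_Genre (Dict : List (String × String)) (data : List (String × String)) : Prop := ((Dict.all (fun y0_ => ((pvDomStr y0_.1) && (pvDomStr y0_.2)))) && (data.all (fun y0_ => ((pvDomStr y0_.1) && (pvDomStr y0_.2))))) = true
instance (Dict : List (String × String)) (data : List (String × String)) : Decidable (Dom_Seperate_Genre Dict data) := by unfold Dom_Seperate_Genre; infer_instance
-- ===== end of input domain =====

-- B replaces A's two staged for-loops (counter loop over the split list, then a range(num,4)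
-- blank-filling loop) with one while-loop under the unified condition 'parts or i <= 3' that
-- destructively consumes the reversed split list via pop(); objective: alternative.
-- Both A and B mutate the passed-in dict in place in the same way (same object, same assignments).

-- ===== PORT A =====
def Seperate_Genre (Dict : List (String × String)) (data : List (String × String)) : List (String × String) :=
  let newDict := PySem.Dict.mk Dict
  let Genre := ((PySem.Dict.mk data).get? "Genre").getD ""   -- Pre_ guarantees the key is present
  let L := (PySem.Str.split? Genre ",").getD []
  let st := L.foldl (fun (st : PySem.Dict String String × Int) genre =>
      (st.1.insert ("Genre" ++ PySem.Int.toStr st.2) genre, st.2 + 1)) (newDict, 1)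
  let newDict2 := (PySem.List.pyRange st.2 4 1).foldl (fun d j =>
      d.insert ("Genre" ++ PySem.Int.toStr j) "") st.1
  newDict2.items

-- ===== PORT B =====
-- the while-loop: condition 'parts or i <= 3'; body pops the last element (or takes '' when empty).
-- fuel = parts.length + 4 only makes the recursion structural; it is provably sufficient, so the
-- loop always stops via its own condition, exactly as the Python while does.
def SG_loop (fuel : Nat) (d : PySem.Dict String String) (parts : List String) (i : Int) : PySem.Dict String String :=
  match fuel with
  | 0 => d
  | fuel + 1 =>
    if parts ≠ [] ∨ i ≤ 3 then
      SG_loop fuel (d.insert ("Genre" ++ PySem.Int.toStr i) ((parts.getLast?).getD "")) parts.dropLast (i + 1)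
    else d

def Seperate_Genre_alt (Dict : List (String × String)) (data : List (String × String)) : List (String × String) :=
  let L := (PySem.Str.split? (((PySem.Dict.mk data).get? "Genre").getD "") ",").getD []
  let parts := (PySem.List.slice? L none none (-1)).getD []    -- [::-1]
  (SG_loop (parts.length + 4) (PySem.Dict.mk Dict) parts 1).items

-- ===== PRECONDITION & SPEC =====
-- Pre_ excludes exactly the inputs where data has no 'Genre' key: there Python A raises KeyError.
def Pre_Seperate_Genre (_Dict : List (String × String)) (data : List (String × String)) : Prop :=
  (PySem.Dict.mk data).contains "Genre" = true
instance (Dict : List (String × String)) (data : List (String × String)) : Decidable (Pre_Seperate_Genre Dict data) := by unfold Pre_Seperate_Genre; infer_instance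
def pvWitness_Seperate_Genre : (List (String × String)) × (List (String × String)) :=
  ([("Title", "X")], [("Genre", "Drama,Comedy")])
def Spec_Seperate_Genre (Dict : List (String × String)) (data : List (String × String)) (out : List (String × String)) : Prop := out = Seperate_Genre_alt Dict data
instance (Dict : List (String × String)) (data : List (String × String)) (out : List (String × String)) : Decidable (Spec_Seperate_Genre Dict data out) := by unfold Spec_Seperate_Genre; infer_instance

-- ===== CLAIM (what is proved, stated in full; the proofs are below) =====
def Claim_equal_Seperate_Genre : Prop := ∀ (Dict : List (String × String)) (data : List (String × String)), Dom_Seperate_Genre Dict data → Pre_Seperate_Genre Dict data → Spec_Seperate_Genre Dict data (Seperate_Genre Dict data)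

-- ===== LEMMAS AND PROOFS =====

-- On the empty list the while-loop keeps inserting blanks while i ≤ 3: it IS A's range(i,4) fill loop.
theorem SG_loop_nil : ∀ (fuel : Nat) (i : Int) (d : PySem.Dict String String), (4 - i).toNat ≤ fuel →
    SG_loop fuel d [] i = (PySem.List.pyRange i 4 1).foldl (fun d j =>
      d.insert ("Genre" ++ PySem.Int.toStr j) "") d := by
  intro fuel
  induction fuel with
  | zero =>
      intro i d hk
      rw [SG_loop, PySem.List.pyRange_one_eq_nil (by omega)]
      simp
  | succ fuel ih =>
      intro i d hk
      by_cases hi : i ≤ 3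
      · rw [SG_loop]
        rw [if_pos (Or.inr hi)]
        simp only [List.getLast?_nil, Option.getD_none, List.dropLast_nil]
        rw [ih (i + 1) _ (by omega), PySem.List.pyRange_one_cons (by omega : i < 4)]
        simp
      · rw [SG_loop, if_neg (by simp; omega), PySem.List.pyRange_one_eq_nil (by omega)]
        simp

-- The while-loop on xs.reverse equals A's counter loop over xs followed by A's range fill loop.
theorem SG_loop_rev (xs : List String) : ∀ (fuel : Nat) (i : Int) (d : PySem.Dict String String),
    xs.length + (4 - i).toNat ≤ fuel →
    SG_loop fuel d xs.reverse i
    = (PySem.List.pyRange (i + xs.length) 4 1).foldl (fun d j =>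
        d.insert ("Genre" ++ PySem.Int.toStr j) "")
      ((xs.foldl (fun (st : PySem.Dict String String × Int) genre =>
        (st.1.insert ("Genre" ++ PySem.Int.toStr st.2) genre, st.2 + 1)) (d, i)).1) := by
  induction xs with
  | nil =>
      intro fuel i d hf
      simpa using SG_loop_nil fuel i d (by simpa using hf)
  | cons x xs ih =>
      intro fuel i d hf
      cases fuel with
      | zero => simp at hf
      | succ fuel =>
          rw [List.reverse_cons, SG_loop,
              if_pos (Or.inl (by simp : ¬(xs.reverse ++ [x]) = []))]
          simp only [List.getLast?_concat, Option.getD_some, List.dropLast_concat]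
          rw [ih fuel (i + 1) _ (by simp at hf ⊢; omega)]
          simp only [List.foldl_cons, List.length_cons]
          congr 2
          push_cast
          ring

-- A's counter ends at i + xs.length.
theorem fold_counter_snd (xs : List String) (d : PySem.Dict String String) (i : Int) :
    (xs.foldl (fun (st : PySem.Dict String String × Int) genre =>
        (st.1.insert ("Genre" ++ PySem.Int.toStr st.2) genre, st.2 + 1)) (d, i)).2
    = i + xs.length := by
  induction xs generalizing d i with
  | nil => simp
  | cons x xs ih => simp [List.foldl_cons, ih]; ring

-- ===== VERDICT (by name: the statement is the Claim_ definition above) =====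
theorem Seperate_Genre_spec : Claim_equal_Seperate_Genre := by
  intro Dict data _ _
  show Seperate_Genre Dict data = Seperate_Genre_alt Dict data
  unfold Seperate_Genre Seperate_Genre_alt
  simp only [PySem.List.slice?_none_none_neg_one, Option.getD_some]
  generalize ((PySem.Str.split? (((PySem.Dict.mk data).get? "Genre").getD "") ",").getD [] : List String) = L
  rw [SG_loop_rev L (L.reverse.length + 4) 1 (PySem.Dict.mk Dict) (by simp), fold_counter_snd]
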